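-- pv_equiv track=rewrite | github.com/rahatzamancse/codelines-comparison | line_counter.py | parse_column_expression
-- ===== SOURCE A (Python) =====
-- def parse_column_expression(expr):
--     """Parse a column expression like '1+3' or '1-3' or '1+2+3'"""
--     if not expr:
--         return None
--
--     # Tokenize the expression into numbers and operators
--     tokens = []
--     current_num = ""
--
--     for char in expr:
--         if char.isdigit():
--             current_num += char
--         elif char in "+-" and current_num:
--             tokens.append(int(current_num))
--             tokens.append(char)
--             current_num = ""
--
--     # Add the last number if there is one
--     if current_num:
--         tokens.append(int(current_num))
--
--     # If no valid tokens were found, return None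
--     if not tokens:
--         return None
--
--     # Create the operations list starting with the first column
--     operations = [('column', tokens[0])]
--
--     # Process the rest of the tokens in pairs (operator, column)
--     for i in range(1, len(tokens), 2):
--         if i + 1 < len(tokens):
--             op = tokens[i]
--             col = tokens[i + 1]
--
--             if op == '+':
--                 operations.append(('add', col))
--             elif op == '-':
--                 operations.append(('subtract', col))
--
--     return operations
-- ===== SOURCE B (Python) =====
-- def parse_column_expression(expr):
--     """Parse a column expression like '1+3' or '1-3' or '1+2+3'"""
--     operations = None
--     pending_op = None
--     current_num = ""
--
--     def flush(n):
--         nonlocal operations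
--         if operations is None:
--             operations = [('column', n)]
--         else:
--             operations.append(('add' if pending_op == '+' else 'subtract', n))
--
--     for ch in expr:
--         if ch.isdigit():
--             current_num += ch
--         elif ch in "+-" and current_num:
--             flush(int(current_num))
--             pending_op = ch
--             current_num = ""
--
--     if current_num:
--         flush(int(current_num))
--
--     return operations
-- ===== Notes on version B (the rewrite author's own statement) =====
-- stated objective: alternative
-- what changed: A tokenizes into a mixed number/operator list and then rebuilds operations with an indexed pairwise loop over the tokens; B fuses both phases into one linear pass that flushes each completed number directly into the operations list using a pending-operator state, so no token list and no index loop exist.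
import Mathlib
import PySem

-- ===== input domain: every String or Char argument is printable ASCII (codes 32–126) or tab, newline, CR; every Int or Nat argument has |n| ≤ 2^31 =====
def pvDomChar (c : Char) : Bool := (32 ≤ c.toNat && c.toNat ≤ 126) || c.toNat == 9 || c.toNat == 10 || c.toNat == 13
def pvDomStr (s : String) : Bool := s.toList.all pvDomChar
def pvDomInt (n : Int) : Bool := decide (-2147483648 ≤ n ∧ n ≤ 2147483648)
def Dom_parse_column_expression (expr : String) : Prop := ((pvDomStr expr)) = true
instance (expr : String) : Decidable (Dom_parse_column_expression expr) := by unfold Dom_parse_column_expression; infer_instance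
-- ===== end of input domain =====

-- B fuses A's two phases (tokenize to a mixed list, then an indexed pairwise loop) into one
-- linear pass flushing each completed number directly into the operations list (objective: alternative).

-- ===== PORT A =====
-- Python's token list mixes ints and the chars '+'/'-': modelled by a sum type.
inductive Tok where
  | num : Int → Tok
  | op : Char → Tok
deriving DecidableEq, Repr

-- Python would place the token itself in the tuple; by construction the tokens read as
-- columns are always numbers, so the .op branch is unreachable.
def pvTokInt : Tok → Int
  | .num n => n
  | .op c => (c.toNat : Int)

-- one step of A's tokenizing loop (state: tokens, current_num)
def pvStepA (s : List Tok × List Char) (ch : Char) : List Tok × List Char :=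
  if PySem.Chars.isdigit ch then (s.1, s.2 ++ [ch])
  else if (ch == '+' || ch == '-') && !s.2.isEmpty then
    (s.1 ++ [Tok.num ((PySem.Int.ofChars? s.2).getD 0), Tok.op ch], [])
  else s

-- body of A's indexed loop 'for i in range(1, len(tokens), 2)'
def pvG (n : Int) (tokens : List Tok) (acc : List (String × Int)) (i : Int) : List (String × Int) :=
  if i + 1 < n then
    let op := PySem.List.pyGetD tokens i (Tok.op ' ')
    let col := PySem.List.pyGetD tokens (i + 1) (Tok.op ' ')
    if op = Tok.op '+' then acc ++ [("add", pvTokInt col)]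
    else if op = Tok.op '-' then acc ++ [("subtract", pvTokInt col)]
    else acc
  else acc

def pvPhase2 (tokens : List Tok) : List (String × Int) :=
  (PySem.List.pyRange 1 (tokens.length : Int) 2).foldl (pvG (tokens.length : Int) tokens)
    [("column", pvTokInt (PySem.List.pyGetD tokens 0 (Tok.op ' ')))]

def parse_column_expression (expr : String) : Option (List (String × Int)) :=
  if expr == "" then none
  else
    let st := expr.toList.foldl pvStepA ([], [])
    let tokens := if !st.2.isEmpty then st.1 ++ [Tok.num ((PySem.Int.ofChars? st.2).getD 0)] else st.1
    if tokens.isEmpty then none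
    else some (pvPhase2 tokens)

-- ===== PORT B =====
-- Source B's flush(n): start the list with ('column', n), later append via the pending operator
def pvFlush (ops : Option (List (String × Int))) (pend : Option Char) (n : Int) : List (String × Int) :=
  match ops with
  | none => [("column", n)]
  | some l => l ++ [((if pend == some '+' then "add" else "subtract"), n)]

-- one step of B's single pass (state: operations, pending_op, current_num)
def pvStepB (s : Option (List (String × Int)) × Option Char × List Char) (ch : Char) :
    Option (List (String × Int)) × Option Char × List Char :=
  if PySem.Chars.isdigit ch then (s.1, s.2.1, s.2.2 ++ [ch])
  else if (ch == '+' || ch == '-') && !s.2.2.isEmpty then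
    (some (pvFlush s.1 s.2.1 ((PySem.Int.ofChars? s.2.2).getD 0)), some ch, [])
  else s

def parse_column_expression_alt (expr : String) : Option (List (String × Int)) :=
  let st := expr.toList.foldl pvStepB (none, none, [])
  if st.2.2.isEmpty then st.1
  else some (pvFlush st.1 st.2.1 ((PySem.Int.ofChars? st.2.2).getD 0))

-- ===== PRECONDITION & SPEC =====
def Spec_parse_column_expression (expr : String) (out : Option (List (String × Int))) : Prop := out = parse_column_expression_alt expr
instance (expr : String) (out : Option (List (String × Int))) : Decidable (Spec_parse_column_expression expr out) := by unfold Spec_parse_column_expression; infer_instance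

-- ===== CLAIM (what is proved, stated in full; the proofs are below) =====
def Claim_equal_parse_column_expression : Prop := ∀ (expr : String), Dom_parse_column_expression expr → Spec_parse_column_expression expr (parse_column_expression expr)

-- ===== LEMMAS AND PROOFS =====

-- abstraction: A's token list is always a flattened list of (number, operator) pairs,
-- possibly followed by one number built from current_num at the end.
def pvFlat : List (Int × Char) → List Tok
  | [] => []
  | (n, o) :: ps => Tok.num n :: Tok.op o :: pvFlat ps

def pvOpn (o : Char) : String := if o = '+' then "add" else "subtract"

def pvChain : Char → List (Int × Char) → List (String × Int)
  | _, [] => []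
  | o, (n, o') :: ps => (pvOpn o, n) :: pvChain o' ps

def pvLastO : Char → List (Int × Char) → Char
  | o, [] => o
  | _, (_, o') :: ps => pvLastO o' ps

def pvAbsOps : List (Int × Char) → Option (List (String × Int))
  | [] => none
  | (n, o) :: ps => some (("column", n) :: pvChain o ps)

def pvAbsPend : List (Int × Char) → Option Char
  | [] => none
  | (_, o) :: ps => some (pvLastO o ps)

def pvOK (ps : List (Int × Char)) : Prop := ∀ p ∈ ps, p.2 = '+' ∨ p.2 = '-'

def pvBody (L : List Tok) (i : Int) : List (String × Int) :=
  if i + 1 < (L.length : Int) then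
    let op := PySem.List.pyGetD L i (Tok.op ' ')
    let col := PySem.List.pyGetD L (i + 1) (Tok.op ' ')
    if op = Tok.op '+' then [("add", pvTokInt col)]
    else if op = Tok.op '-' then [("subtract", pvTokInt col)]
    else []
  else []

def pvLoop (L : List Tok) : List (String × Int) :=
  (List.range (L.length / 2)).flatMap (fun (k : ℕ) => pvBody L (1 + 2 * (k : Int)))

def pvTail : Option Int → List Tok
  | none => []
  | some v => [Tok.num v]

def pvOptE (o : Char) : Option Int → List (String × Int)
  | none => []
  | some v => [(pvOpn o, v)]

lemma pvOpn_eq (o : Char) : (if (some o == some '+') = true then "add" else "subtract") = pvOpn o := by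
  unfold pvOpn; by_cases h : o = '+' <;> simp [h]

lemma pvFlat_snoc (ps : List (Int × Char)) (v : Int) (c : Char) :
    pvFlat (ps ++ [(v, c)]) = pvFlat ps ++ [Tok.num v, Tok.op c] := by
  induction ps with
  | nil => rfl
  | cons p ps ih => cases p; simp [pvFlat, ih]

lemma pvChain_snoc (o : Char) (ps : List (Int × Char)) (v : Int) (c : Char) :
    pvChain o (ps ++ [(v, c)]) = pvChain o ps ++ [(pvOpn (pvLastO o ps), v)] := by
  induction ps generalizing o with
  | nil => rfl
  | cons p ps ih => cases p; simp [pvChain, pvLastO, ih]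

lemma pvLastO_snoc (o : Char) (ps : List (Int × Char)) (v : Int) (c : Char) :
    pvLastO o (ps ++ [(v, c)]) = c := by
  induction ps generalizing o with
  | nil => rfl
  | cons p ps ih => cases p; simp [pvLastO, ih]

lemma pvAbsOps_snoc (ps : List (Int × Char)) (v : Int) (c : Char) :
    pvAbsOps (ps ++ [(v, c)]) = some (pvFlush (pvAbsOps ps) (pvAbsPend ps) v) := by
  cases ps with
  | nil => rfl
  | cons p ps =>
    cases p with
    | mk n o =>
      simp only [List.cons_append, pvAbsOps, pvAbsPend, pvFlush, pvChain_snoc,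
        Option.some.injEq, List.cons_append]
      unfold pvOpn
      by_cases h : pvLastO o ps = '+' <;> simp [h]

lemma pvAbsPend_snoc (ps : List (Int × Char)) (v : Int) (c : Char) :
    pvAbsPend (ps ++ [(v, c)]) = some c := by
  cases ps with
  | nil => rfl
  | cons p ps => cases p; simp [pvAbsPend, pvLastO_snoc]

-- pyRange 1 n 2 as a mapped List.range, uniformly in the (Nat) length
lemma pvRange2 (n : ℕ) : PySem.List.pyRange 1 (n : Int) 2 =
    (List.range (n / 2)).map (fun (k : ℕ) => (1 + 2 * (k : Int))) := by
  rw [PySem.List.pyRange_of_pos _ _ (by norm_num)]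
  have : (if (1 : Int) < (n : Int) then (((n : Int) - 1 + 2 - 1) / 2).toNat else 0) = n / 2 := by
    split_ifs with h <;> omega
  rw [this]

lemma pvG_append (L : List Tok) (acc : List (String × Int)) (i : Int) :
    pvG (L.length : Int) L acc i = acc ++ pvBody L i := by
  unfold pvG pvBody
  by_cases h : i + 1 < (L.length : Int)
  · simp only [if_pos h]
    split_ifs <;> simp
  · simp [if_neg h]

lemma pvPhase2_eq_loop (L : List Tok) :
    pvPhase2 L = ("column", pvTokInt (PySem.List.pyGetD L 0 (Tok.op ' '))) :: pvLoop L := by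
  unfold pvPhase2 pvLoop
  rw [pvRange2, List.foldl_map]
  have : (fun (acc : List (String × Int)) (k : ℕ) => pvG (L.length : Int) L acc (1 + 2 * (k : Int)))
      = fun (acc : List (String × Int)) (k : ℕ) => acc ++ pvBody L (1 + 2 * (k : Int)) := by
    funext acc k; exact pvG_append L acc _
  rw [this, PySem.List.foldl_append_eq_flatMap]
  rfl

lemma pvBody_shift (x y : Tok) (L : List Tok) (k : ℕ) :
    pvBody (x :: y :: L) (1 + 2 * ((k : Int) + 1)) = pvBody L (1 + 2 * (k : Int)) := by
  unfold pvBody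
  have h1 : (1 + 2 * ((k : Int) + 1)) = ((2 * k + 3 : ℕ) : Int) := by push_cast; ring
  have h3 : (1 + 2 * (k : Int)) = ((2 * k + 1 : ℕ) : Int) := by push_cast; ring
  have h4 : (1 + 2 * (k : Int)) + 1 = ((2 * k + 2 : ℕ) : Int) := by push_cast; ring
  rw [h1]
  rw [show ((2 * k + 3 : ℕ) : Int) + 1 = ((2 * k + 4 : ℕ) : Int) by push_cast; ring]
  rw [h3]
  rw [show ((2 * k + 1 : ℕ) : Int) + 1 = ((2 * k + 2 : ℕ) : Int) by push_cast; ring]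
  simp only [PySem.List.pyGetD_natCast]
  have hlen : ((x :: y :: L).length : Int) = (L.length : Int) + 2 := by push_cast [List.length_cons]; ring
  rw [hlen]
  have hcond : (((2 * k + 4 : ℕ) : Int) < (L.length : Int) + 2) ↔ (((2 * k + 2 : ℕ) : Int) < (L.length : Int)) := by
    push_cast; omega
  have hgd1 : (x :: y :: L).getD (2 * k + 3) (Tok.op ' ') = L.getD (2 * k + 1) (Tok.op ' ') := rfl
  have hgd2 : (x :: y :: L).getD (2 * k + 4) (Tok.op ' ') = L.getD (2 * k + 2) (Tok.op ' ') := rfl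
  rw [hgd1, hgd2]
  by_cases hc : ((2 * k + 2 : ℕ) : Int) < (L.length : Int)
  · rw [if_pos (hcond.mpr hc), if_pos hc]
  · rw [if_neg (fun hh => hc (hcond.mp hh)), if_neg hc]

lemma pvLoop_peel (x y : Tok) (L : List Tok) :
    pvLoop (x :: y :: L) = pvBody (x :: y :: L) 1 ++ pvLoop L := by
  unfold pvLoop
  have hlen : (x :: y :: L).length / 2 = L.length / 2 + 1 := by
    simp only [List.length_cons]; omega
  rw [hlen, List.range_succ_eq_map]
  simp only [List.flatMap_cons, List.flatMap_map, Nat.succ_eq_add_one, Nat.cast_add,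
    Nat.cast_one]
  apply congr_arg₂ (· ++ ·)
  · norm_num
  · exact List.flatMap_congr (fun k _ => pvBody_shift x y L k)

lemma pvLoop_flat : ∀ (ps : List (Int × Char)) (a : Int) (o : Char), pvOK ps → (o = '+' ∨ o = '-') →
    ∀ (t : Option Int),
    pvLoop (Tok.num a :: Tok.op o :: (pvFlat ps ++ pvTail t)) =
      pvChain o ps ++ pvOptE (pvLastO o ps) t := by
  intro ps
  induction ps with
  | nil =>
    intro a o _ ho t
    cases t with
    | none =>
      rcases ho with ho | ho <;> subst ho <;>
        simp [pvLoop, pvFlat, pvTail, pvBody, pvChain, pvLastO, pvOptE, List.range_one,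
          PySem.List.pyGetD]
    | some v =>
      rcases ho with ho | ho <;> subst ho <;>
        simp [pvLoop, pvFlat, pvTail, pvBody, pvChain, pvLastO, pvOptE, pvOpn, pvTokInt,
          List.range_one, PySem.List.pyGetD]
  | cons p ps ih =>
    intro a o hok ho t
    obtain ⟨n1, o1⟩ := p
    have hL : Tok.num a :: Tok.op o :: (pvFlat ((n1, o1) :: ps) ++ pvTail t)
        = Tok.num a :: Tok.op o :: (Tok.num n1 :: Tok.op o1 :: (pvFlat ps ++ pvTail t)) := by
      simp [pvFlat]
    rw [hL, pvLoop_peel]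
    have hok' : pvOK ps := fun p hp => hok p (List.mem_cons_of_mem _ hp)
    have ho1 : o1 = '+' ∨ o1 = '-' := hok (n1, o1) List.mem_cons_self
    rw [ih n1 o1 hok' ho1 t]
    have hbody : pvBody (Tok.num a :: Tok.op o :: Tok.num n1 :: Tok.op o1 :: (pvFlat ps ++ pvTail t)) 1
        = [(pvOpn o, n1)] := by
      have e1 : PySem.List.pyGetD
          (Tok.num a :: Tok.op o :: Tok.num n1 :: Tok.op o1 :: (pvFlat ps ++ pvTail t)) 1
          (Tok.op ' ') = Tok.op o := by
        rw [show (1 : Int) = ((1 : ℕ) : Int) from rfl, PySem.List.pyGetD_natCast]; rfl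
      have e2 : PySem.List.pyGetD
          (Tok.num a :: Tok.op o :: Tok.num n1 :: Tok.op o1 :: (pvFlat ps ++ pvTail t)) (1 + 1)
          (Tok.op ' ') = Tok.num n1 := by
        rw [show ((1 : Int) + 1) = ((2 : ℕ) : Int) from rfl, PySem.List.pyGetD_natCast]; rfl
      have hcond : (1 : Int) + 1
          < ((Tok.num a :: Tok.op o :: Tok.num n1 :: Tok.op o1 :: (pvFlat ps ++ pvTail t)).length : Int) := by
        simp only [List.length_cons]; push_cast; omega
      unfold pvBody
      rw [if_pos hcond]
      simp only [e1, e2]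
      rcases ho with ho | ho <;> subst ho <;> simp [pvOpn, pvTokInt]
    rw [hbody]
    simp [pvChain, pvLastO]

lemma pvFoldSim : ∀ (cs : List Char) (ps : List (Int × Char)) (cur : List Char), pvOK ps →
    ∃ ps' cur', pvOK ps' ∧
      cs.foldl pvStepA (pvFlat ps, cur) = (pvFlat ps', cur') ∧
      cs.foldl pvStepB (pvAbsOps ps, pvAbsPend ps, cur) = (pvAbsOps ps', pvAbsPend ps', cur') := by
  intro cs
  induction cs with
  | nil => intro ps cur h; exact ⟨ps, cur, h, rfl, rfl⟩
  | cons ch cs ih =>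
    intro ps cur h
    simp only [List.foldl_cons]
    by_cases hd : PySem.Chars.isdigit ch = true
    · have hA : pvStepA (pvFlat ps, cur) ch = (pvFlat ps, cur ++ [ch]) := by
        simp [pvStepA, hd]
      have hB : pvStepB (pvAbsOps ps, pvAbsPend ps, cur) ch
          = (pvAbsOps ps, pvAbsPend ps, cur ++ [ch]) := by
        simp [pvStepB, hd]
      rw [hA, hB]; exact ih ps (cur ++ [ch]) h
    · by_cases hop : ((ch == '+' || ch == '-') && !cur.isEmpty) = true
      · have hchar : ch = '+' ∨ ch = '-' := by
          rcases Bool.and_eq_true .. |>.mp hop with ⟨h1, -⟩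
          rcases Bool.or_eq_true .. |>.mp h1 with h2 | h2
          · exact Or.inl (eq_of_beq h2)
          · exact Or.inr (eq_of_beq h2)
        have hA : pvStepA (pvFlat ps, cur) ch
            = (pvFlat (ps ++ [((PySem.Int.ofChars? cur).getD 0, ch)]), []) := by
          simp [pvStepA, hd, hop, pvFlat_snoc]
        have hB : pvStepB (pvAbsOps ps, pvAbsPend ps, cur) ch
            = (pvAbsOps (ps ++ [((PySem.Int.ofChars? cur).getD 0, ch)]),
               pvAbsPend (ps ++ [((PySem.Int.ofChars? cur).getD 0, ch)]), []) := by
          simp [pvStepB, hd, hop, pvAbsOps_snoc, pvAbsPend_snoc]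
        rw [hA, hB]
        refine ih (ps ++ [((PySem.Int.ofChars? cur).getD 0, ch)]) [] ?_
        intro p hp
        rcases List.mem_append.mp hp with hp | hp
        · exact h p hp
        · simp at hp; subst hp; exact hchar
      · have hA : pvStepA (pvFlat ps, cur) ch = (pvFlat ps, cur) := by
          simp [pvStepA, hd, hop]
        have hB : pvStepB (pvAbsOps ps, pvAbsPend ps, cur) ch
            = (pvAbsOps ps, pvAbsPend ps, cur) := by
          simp [pvStepB, hd, hop]
        rw [hA, hB]; exact ih ps cur h

-- ===== VERDICT (by name: the statement is the Claim_ definition above) =====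
lemma pvPhase2_single (v : Int) : pvPhase2 [Tok.num v] = [("column", v)] := by
  rw [pvPhase2_eq_loop]
  simp [pvLoop, pvTokInt, PySem.List.pyGetD]

lemma pvPhase2_flat (ps : List (Int × Char)) (n0 : Int) (o0 : Char) (hok : pvOK ps)
    (ho : o0 = '+' ∨ o0 = '-') (t : Option Int) :
    pvPhase2 (Tok.num n0 :: Tok.op o0 :: (pvFlat ps ++ pvTail t))
      = ("column", n0) :: (pvChain o0 ps ++ pvOptE (pvLastO o0 ps) t) := by
  rw [pvPhase2_eq_loop, pvLoop_flat ps n0 o0 hok ho t]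
  simp [pvTokInt, PySem.List.pyGetD]

theorem parse_column_expression_spec : Claim_equal_parse_column_expression := by
  intro expr _
  unfold Spec_parse_column_expression parse_column_expression parse_column_expression_alt
  by_cases he : (expr == "") = true
  · have hnil : expr.toList = [] := by
      have : expr = "" := eq_of_beq he
      subst this; rfl
    simp [he, hnil]
  · obtain ⟨ps', cur', hok, hA, hB⟩ := pvFoldSim expr.toList [] [] (by intro p hp; cases hp)
    have hA' : expr.toList.foldl pvStepA ([], []) = (pvFlat ps', cur') := hA
    have hB' : expr.toList.foldl pvStepB (none, none, []) = (pvAbsOps ps', pvAbsPend ps', cur') := hB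
    simp only [he, if_false, Bool.false_eq_true, hA', hB']
    by_cases hc : cur'.isEmpty
    · cases ps' with
      | nil => simp [hc, pvFlat, pvAbsOps]
      | cons p ps =>
        obtain ⟨n0, o0⟩ := p
        have ho0 : o0 = '+' ∨ o0 = '-' := hok (n0, o0) List.mem_cons_self
        have hok' : pvOK ps := fun q hq => hok q (List.mem_cons_of_mem _ hq)
        have hsh : pvFlat ((n0, o0) :: ps)
            = Tok.num n0 :: Tok.op o0 :: (pvFlat ps ++ pvTail none) := by simp [pvFlat, pvTail]
        simp only [hc, Bool.not_true, if_false, Bool.false_eq_true, if_true]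
        rw [hsh]
        simp only [List.isEmpty_cons, Bool.false_eq_true, if_false]
        rw [pvPhase2_flat ps n0 o0 hok' ho0 none]
        simp [pvAbsOps, pvOptE]
    · cases ps' with
      | nil =>
        simp only [hc, pvFlat, pvAbsOps, pvAbsPend]
        simp only [Bool.not_false, if_true, List.nil_append]
        simp [hc, pvPhase2_single, pvFlush]
      | cons p ps =>
        obtain ⟨n0, o0⟩ := p
        have ho0 : o0 = '+' ∨ o0 = '-' := hok (n0, o0) List.mem_cons_self
        have hok' : pvOK ps := fun q hq => hok q (List.mem_cons_of_mem _ hq)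
        have hsh : pvFlat ((n0, o0) :: ps) ++ [Tok.num ((PySem.Int.ofChars? cur').getD 0)]
            = Tok.num n0 :: Tok.op o0 ::
                (pvFlat ps ++ pvTail (some ((PySem.Int.ofChars? cur').getD 0))) := by
          simp [pvFlat, pvTail]
        simp only [hc, Bool.not_false, if_true]
        rw [hsh]
        simp only [List.isEmpty_cons, Bool.false_eq_true, if_false]
        rw [pvPhase2_flat ps n0 o0 hok' ho0 (some ((PySem.Int.ofChars? cur').getD 0))]
        simp [pvAbsOps, pvAbsPend, pvFlush, pvOptE, pvOpn_eq, pvOpn]
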